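-- pv_equiv track=rewrite | github.com/MCaburrasi/Programacion | src/Python/Entrega/piramide_de_canicas.py | contador_de_canicas
-- ===== SOURCE A (Python) =====
-- def contador_de_canicas(numero):
--     piso_anterior = 0
--     canicas = 0
--     for i in range(numero):
--         canicas_piso = piso_anterior + (i+1)
--         canicas += canicas_piso
--         piso_anterior = canicas_piso
--
--     return canicas
-- ===== SOURCE B (Python) =====
-- def contador_de_canicas(numero):
--     n = max(numero, 0)
--     return n * (n + 1) * (n + 2) // 6
-- ===== Notes on version B (the rewrite author's own statement) =====
-- stated objective: faster
-- what changed: Replaced the O(n) running-sum loop over floors with a closed-form tetrahedral-number formula (clamped below at zero).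
import Mathlib
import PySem

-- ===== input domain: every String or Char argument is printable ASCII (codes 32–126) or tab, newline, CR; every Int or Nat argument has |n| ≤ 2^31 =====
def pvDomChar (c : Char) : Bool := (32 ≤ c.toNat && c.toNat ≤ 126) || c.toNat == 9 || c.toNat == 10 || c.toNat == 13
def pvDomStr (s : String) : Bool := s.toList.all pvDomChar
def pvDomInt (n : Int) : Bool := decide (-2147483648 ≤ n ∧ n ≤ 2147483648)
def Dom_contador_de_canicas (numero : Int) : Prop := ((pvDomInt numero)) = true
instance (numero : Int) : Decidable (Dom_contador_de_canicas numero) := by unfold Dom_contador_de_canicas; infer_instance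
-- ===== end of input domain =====

-- B replaces A's O(n) floor-by-floor accumulation loop with the closed-form
-- tetrahedral-number formula (clamped below at zero): asymptotically faster.


-- ===== PORT A =====
-- for i in range(numero): canicas_piso = piso_anterior + (i+1); canicas += canicas_piso; piso_anterior = canicas_piso
def contador_de_canicas (numero : Int) : Int :=
  let st := (PySem.List.pyRange 0 numero 1).foldl
    (fun (st : Int × Int) (i : Int) =>
      let canicas_piso := st.1 + (i + 1)
      (canicas_piso, st.2 + canicas_piso))
    (0, 0)
  st.2

-- ===== PORT B =====
def contador_de_canicas_alt (numero : Int) : Int :=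
  let n := max numero 0
  PySem.Int.floordiv (n * (n + 1) * (n + 2)) 6

-- ===== PRECONDITION & SPEC =====
def Spec_contador_de_canicas (numero : Int) (out : Int) : Prop := out = contador_de_canicas_alt numero
instance (numero : Int) (out : Int) : Decidable (Spec_contador_de_canicas numero out) := by unfold Spec_contador_de_canicas; infer_instance

-- ===== CLAIM (what is proved, stated in full; the proofs are below) =====
def Claim_equal_contador_de_canicas : Prop := ∀ (numero : Int), Dom_contador_de_canicas numero → Spec_contador_de_canicas numero (contador_de_canicas numero)

-- ===== LEMMAS AND PROOFS =====

-- the loop over range(n) ends in the state (triangular n, tetrahedral n)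
theorem contador_loop_eq (n : Nat) :
    (PySem.List.pyRange 0 (n : Int) 1).foldl
      (fun (st : Int × Int) (i : Int) =>
        let canicas_piso := st.1 + (i + 1)
        (canicas_piso, st.2 + canicas_piso))
      (0, 0)
    = ((n : Int) * (n + 1) / 2, (n : Int) * (n + 1) * (n + 2) / 6) := by
  induction n with
  | zero => simp [PySem.List.pyRange]
  | succ m ih =>
    have hc : ((m + 1 : Nat) : Int) = (m : Int) + 1 := by push_cast; ring
    rw [hc, PySem.List.pyRange_one_succ_right (by positivity), List.foldl_append, ih]
    simp only [List.foldl_cons, List.foldl_nil]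
    have hm : ((m : Int) * (m + 1)) = 2 * ((m : Int) * (m + 1) / 2) := by
      rw [Int.mul_ediv_cancel']
      exact Int.even_mul_succ_self m |>.two_dvd
    have h6 : (6 : Int) ∣ (m : Int) * (m + 1) * (m + 2) := by
      obtain ⟨k, r, hr, hmk⟩ : ∃ k r, r < 6 ∧ m = 6 * k + r :=
        ⟨m / 6, m % 6, Nat.mod_lt _ (by norm_num), by omega⟩
      interval_cases r <;> · subst hmk; push_cast; ring_nf; omega
    have h6' : ((m : Int) * (m + 1) * (m + 2)) = 6 * ((m : Int) * (m + 1) * (m + 2) / 6) :=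
      (Int.mul_ediv_cancel' h6).symm
    have h6s : (6 : Int) ∣ ((m : Int) + 1) * (((m : Int) + 1) + 1) * (((m : Int) + 1) + 2) := by
      obtain ⟨k, r, hr, hmk⟩ : ∃ k r, r < 6 ∧ m = 6 * k + r :=
        ⟨m / 6, m % 6, Nat.mod_lt _ (by norm_num), by omega⟩
      interval_cases r <;> · subst hmk; push_cast; ring_nf; omega
    have h6s' : (((m : Int) + 1) * (((m : Int) + 1) + 1) * (((m : Int) + 1) + 2))
        = 6 * ((((m : Int) + 1) * (((m : Int) + 1) + 1) * (((m : Int) + 1) + 2)) / 6) :=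
      (Int.mul_ediv_cancel' h6s).symm
    have h2s : (((m : Int) + 1) * (((m : Int) + 1) + 1)) = 2 * ((((m : Int) + 1) * (((m : Int) + 1) + 1)) / 2) := by
      rw [Int.mul_ediv_cancel']
      exact (Int.even_mul_succ_self ((m : Int) + 1)).two_dvd
    have hr1 : ((m : Int) + 1) * (((m : Int) + 1) + 1) = (m : Int) * ((m : Int) + 1) + 2 * ((m : Int) + 1) := by ring
    have hr2 : ((m : Int) + 1) * (((m : Int) + 1) + 1) * (((m : Int) + 1) + 2)
        = (m : Int) * ((m : Int) + 1) * ((m : Int) + 2) + 3 * (((m : Int) + 1) * (((m : Int) + 1) + 1)) := by ring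
    rw [Prod.mk.injEq]
    exact ⟨by omega, by omega⟩

-- ===== VERDICT (by name: the statement is the Claim_ definition above) =====
theorem contador_de_canicas_spec : Claim_equal_contador_de_canicas := by
  intro numero _
  unfold Spec_contador_de_canicas contador_de_canicas contador_de_canicas_alt
  have hr : PySem.List.pyRange 0 numero 1 = PySem.List.pyRange 0 ((numero.toNat : Nat) : Int) 1 := by
    rw [PySem.List.pyRange_one, PySem.List.pyRange_one]
    congr 2
    omega
  rw [hr, contador_loop_eq]
  have hmax : max numero 0 = ((numero.toNat : Nat) : Int) := by omega
  rw [hmax, PySem.Int.floordiv_eq_ediv_of_pos (by norm_num)]
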